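-- pv_equiv track=rewrite | github.com/3dyuval/keyboards-firmware | scripts/format_keymap.py | calculate_global_widths
-- ===== SOURCE A (Python) =====
-- def calculate_global_widths(all_bindings_blocks):
--     """Calculate maximum column widths across all layers"""
--     global_max_widths = []
--
--     for col in range(12):  # Corne has 12 columns
--         max_width = 0
--         for prefix, bindings, suffix in all_bindings_blocks:
--             if len(bindings) >= 42:  # Standard Corne layout
--                 # Check all 3 main rows for this column
--                 for row in range(3):
--                     key_idx = row * 12 + col
--                     if key_idx < len(bindings):
--                         max_width = max(max_width, len(bindings[key_idx]))
--         # Add extra spacing between keys (increased for long function layer bindings)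
--         global_max_widths.append(max_width + 4)
--
--     return global_max_widths
-- ===== SOURCE B (Python) =====
-- def calculate_global_widths(all_bindings_blocks):
--     """Calculate maximum column widths across all layers (rows-slice + transpose)"""
--     rows = [bindings[start:start + 12]
--             for _, bindings, _ in all_bindings_blocks
--             if len(bindings) >= 42
--             for start in (0, 12, 24)]
--     columns = zip(*rows) if rows else [()] * 12
--     return [max(map(len, column), default=0) + 4 for column in columns]
-- ===== Notes on version B (the rewrite author's own statement) =====
-- stated objective: idiomatic
-- what changed: Instead of A's 12 per-column rescans with nested row/index loops and bound checks, B slices each qualifying layer into its 3 key rows, transposes the row lists with zip(*rows), and takes max(map(len, column), default=0)+4 per transposed column.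
import Mathlib
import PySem

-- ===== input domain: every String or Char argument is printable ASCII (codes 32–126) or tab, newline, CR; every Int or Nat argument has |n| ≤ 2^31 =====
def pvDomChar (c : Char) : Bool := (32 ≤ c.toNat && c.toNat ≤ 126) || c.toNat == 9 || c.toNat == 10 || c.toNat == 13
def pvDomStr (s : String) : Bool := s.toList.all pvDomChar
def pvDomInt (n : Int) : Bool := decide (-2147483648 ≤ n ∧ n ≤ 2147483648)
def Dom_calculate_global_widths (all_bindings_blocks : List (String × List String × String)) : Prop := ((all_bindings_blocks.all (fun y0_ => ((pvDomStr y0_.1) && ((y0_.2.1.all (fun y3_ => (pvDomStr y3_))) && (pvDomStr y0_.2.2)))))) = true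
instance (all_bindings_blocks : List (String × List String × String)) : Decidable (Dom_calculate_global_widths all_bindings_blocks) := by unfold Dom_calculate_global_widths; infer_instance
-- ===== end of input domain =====

-- B replaces A's nested index loops by slicing each qualifying layer into its 3 key rows, transposing with zip, and taking the max length per transposed column (alternative decomposition, same cost).

-- ===== PORT A =====
-- `len(bindings[key_idx])`: the guard `key_idx < len(bindings)` makes the index in range, so `.getD ""` is never taken.
def calculate_global_widths (all_bindings_blocks : List (String × List String × String)) : List Int :=
  (PySem.List.pyRange 0 12 1).foldl (fun global_max_widths col =>
    let max_width : Int := all_bindings_blocks.foldl (fun max_width blk =>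
      let bindings := blk.2.1
      if (42 : Int) ≤ (bindings.length : Int) then
        (PySem.List.pyRange 0 3 1).foldl (fun max_width row =>
          let key_idx := row * 12 + col
          if key_idx < (bindings.length : Int) then
            max max_width (PySem.Str.len ((PySem.List.pyGet? bindings key_idx).getD ""))
          else max_width) max_width
      else max_width) 0
    global_max_widths ++ [max_width + 4]) []

-- ===== PORT B =====
-- `zip(*rows)` ported as its characterization: the j-th elements of every row, for j below the shortest row length.
def pyZipStar (rows : List (List String)) : List (List String) :=
  match rows with
  | [] => []
  | r0 :: rest =>
      (List.range (rest.foldl (fun m r => min m r.length) r0.length)).map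
        (fun j => (r0 :: rest).map (fun r => r.getD j ""))

-- `max(map(len, column), default=0)` is PySem.List.maxD over the lengths with identity key.
def calculate_global_widths_alt (all_bindings_blocks : List (String × List String × String)) : List Int :=
  let rows : List (List String) := all_bindings_blocks.flatMap (fun blk =>
    if (42 : Int) ≤ (blk.2.1.length : Int) then
      ([0, 12, 24] : List Int).map (fun start =>
        PySem.List.slice blk.2.1 (some start) (some (start + 12)))
    else [])
  let columns : List (List String) :=
    if rows.isEmpty then List.replicate 12 [] else pyZipStar rows
  columns.map (fun column =>
    PySem.List.maxD (column.map PySem.Str.len) (fun x => x) 0 + 4)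

-- ===== PRECONDITION & SPEC =====
def Spec_calculate_global_widths (all_bindings_blocks : List (String × List String × String)) (out : List Int) : Prop := out = calculate_global_widths_alt all_bindings_blocks
instance (all_bindings_blocks : List (String × List String × String)) (out : List Int) : Decidable (Spec_calculate_global_widths all_bindings_blocks out) := by unfold Spec_calculate_global_widths; infer_instance

-- ===== CLAIM =====
def Claim_equal_calculate_global_widths : Prop := ∀ (all_bindings_blocks : List (String × List String × String)), Dom_calculate_global_widths all_bindings_blocks → Spec_calculate_global_widths all_bindings_blocks (calculate_global_widths all_bindings_blocks)

-- ===== LEMMAS AND PROOFS =====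

-- length of key string i of a block (leaf expression of A's port)
def pvL (bindings : List String) (i : Int) : Int :=
  PySem.Str.len ((PySem.List.pyGet? bindings i).getD "")

-- A's per-block step for one column
def pvStepA (col : Int) (max_width : Int) (blk : String × List String × String) : Int :=
  let bindings := blk.2.1
  if (42 : Int) ≤ (bindings.length : Int) then
    (PySem.List.pyRange 0 3 1).foldl (fun max_width row =>
      let key_idx := row * 12 + col
      if key_idx < (bindings.length : Int) then
        max max_width (pvL bindings key_idx)
      else max_width) max_width
  else max_width

-- B's per-block row list
def pvRowsOf (blk : String × List String × String) : List (List String) :=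
  if (42 : Int) ≤ (blk.2.1.length : Int) then
    ([0, 12, 24] : List Int).map (fun start =>
      PySem.List.slice blk.2.1 (some start) (some (start + 12)))
  else []

lemma pvStepA_closed (col max_width : Int) (blk : String × List String × String)
    (h0 : 0 ≤ col) (h1 : col ≤ 11) (h : (42 : Int) ≤ (blk.2.1.length : Int)) :
    pvStepA col max_width blk =
      max (max (max max_width (pvL blk.2.1 (0 * 12 + col))) (pvL blk.2.1 (1 * 12 + col)))
        (pvL blk.2.1 (2 * 12 + col)) := by
  simp only [pvStepA, if_pos h, show PySem.List.pyRange 0 3 1 = [0, 1, 2] from rfl, List.foldl]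
  rw [if_pos (by omega), if_pos (by omega), if_pos (by omega)]

lemma pvRowsOf_qual (blk : String × List String × String)
    (h : (42 : Int) ≤ (blk.2.1.length : Int)) :
    pvRowsOf blk = [blk.2.1.take 12, (blk.2.1.drop 12).take 12, (blk.2.1.drop 24).take 12] := by
  have e : ∀ s : Nat, PySem.List.slice blk.2.1 (some ((s : Nat) : Int)) (some (((s : Nat) : Int) + 12))
      = (blk.2.1.drop s).take 12 := by
    intro s
    simpa using PySem.List.slice_natCast_add blk.2.1 s 12
  have e0 := e 0; have e12 := e 12; have e24 := e 24
  norm_num at e0 e12 e24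
  simp [pvRowsOf, e0, e12, e24]
  exact_mod_cast h

lemma pv_row_len (blocks : List (String × List String × String)) (r : List String)
    (hr : r ∈ blocks.flatMap pvRowsOf) : r.length = 12 := by
  obtain ⟨blk, _, hmem⟩ := List.mem_flatMap.mp hr
  by_cases h : (42 : Int) ≤ (blk.2.1.length : Int)
  · have hlen : 42 ≤ blk.2.1.length := by exact_mod_cast h
    rw [pvRowsOf_qual blk h] at hmem
    simp only [List.mem_cons, List.not_mem_nil, or_false] at hmem
    rcases hmem with h1 | h1 | h1 <;> subst h1 <;>
      simp [List.length_take, List.length_drop] <;> omega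
  · rw [pvRowsOf, if_neg h] at hmem
    exact absurd hmem (List.not_mem_nil)

lemma pv_minfold (rest : List (List String)) (h : ∀ r ∈ rest, r.length = 12) :
    rest.foldl (fun m r => min m r.length) 12 = 12 := by
  induction rest with
  | nil => rfl
  | cons r rs ih =>
    rw [List.foldl_cons, h r (by simp), min_self]
    exact ih (fun r' hr' => h r' (by simp [hr']))

lemma pv_zipStar (r0 : List String) (rest : List (List String))
    (h : ∀ r ∈ r0 :: rest, r.length = 12) :
    pyZipStar (r0 :: rest)
      = (List.range 12).map (fun j => (r0 :: rest).map (fun r => r.getD j "")) := by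
  have h0 : r0.length = 12 := h r0 (by simp)
  have hmin : rest.foldl (fun m r => min m r.length) r0.length = 12 := by
    rw [h0]; exact pv_minfold rest (fun r hr => h r (by simp [hr]))
  simp [pyZipStar, hmin]

lemma pv_take_drop_getD (bs : List String) (s j : Nat) (hj : j < 12) :
    ((bs.drop s).take 12).getD j "" = bs.getD (s + j) "" := by
  simp [List.getD_eq_getElem?_getD, List.getElem?_drop, hj]

lemma pvL_natCast (bs : List String) (i : Nat) :
    pvL bs ((i : Nat) : Int) = PySem.Str.len (bs.getD i "") := by
  simp [pvL, PySem.List.pyGet?_natCast, List.getD_eq_getElem?_getD]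

lemma pv_block_col (blk : String × List String × String) (j : Nat) (hj : j < 12) (m : Int) :
    List.foldl max m (((pvRowsOf blk).map (fun r => r.getD j "")).map PySem.Str.len)
      = pvStepA ((j : Nat) : Int) m blk := by
  by_cases h : (42 : Int) ≤ (blk.2.1.length : Int)
  · rw [pvRowsOf_qual blk h,
      pvStepA_closed ((j : Nat) : Int) m blk (by omega) (by omega) h]
    have c0 : (0 : Int) * 12 + ((j : Nat) : Int) = ((0 + j : Nat) : Int) := by push_cast; ring
    have c1 : (1 : Int) * 12 + ((j : Nat) : Int) = ((12 + j : Nat) : Int) := by push_cast; ring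
    have c2 : (2 : Int) * 12 + ((j : Nat) : Int) = ((24 + j : Nat) : Int) := by push_cast; ring
    rw [c0, c1, c2, pvL_natCast, pvL_natCast, pvL_natCast]
    have d0 : blk.2.1.take 12 = (blk.2.1.drop 0).take 12 := by simp
    simp only [List.map_cons, List.map_nil, List.foldl, d0,
      pv_take_drop_getD blk.2.1 0 j hj, pv_take_drop_getD blk.2.1 12 j hj,
      pv_take_drop_getD blk.2.1 24 j hj]
  · simp only [pvRowsOf, pvStepA]
    rw [if_neg h, if_neg h]
    rfl

lemma pv_len_nonneg (s : String) : (0 : Int) ≤ PySem.Str.len s := by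
  simp [PySem.Str.len_eq]

lemma pv_maxD_foldl (L : List Int) (h : ∀ x ∈ L, (0 : Int) ≤ x) :
    PySem.List.maxD L (fun x => x) 0 = L.foldl max 0 := by
  cases L with
  | nil => rfl
  | cons x t =>
    rw [PySem.List.maxD, PySem.List.max?_id_cons, Option.getD_some, List.foldl_cons,
      max_eq_right (h x (by simp))]

lemma pv_col (blocks : List (String × List String × String)) (j : Nat) (hj : j < 12) :
    blocks.foldl (pvStepA ((j : Nat) : Int)) 0
      = PySem.List.maxD (((blocks.flatMap pvRowsOf).map (fun r => r.getD j "")).map PySem.Str.len)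
          (fun x => x) 0 := by
  rw [pv_maxD_foldl _ (by
    intro x hx
    simp only [List.mem_map] at hx
    obtain ⟨r, _, hr⟩ := hx
    exact hr ▸ pv_len_nonneg r)]
  rw [List.map_flatMap, List.map_flatMap, List.foldl_flatMap]
  have : (fun (acc : Int) blk => List.foldl max acc
      (((pvRowsOf blk).map (fun r => r.getD j "")).map PySem.Str.len))
      = fun acc blk => pvStepA ((j : Nat) : Int) acc blk := by
    funext acc blk; exact pv_block_col blk j hj acc
  rw [this]

lemma pv_foldl_unqual (blocks : List (String × List String × String))
    (h : ∀ blk ∈ blocks, pvRowsOf blk = []) (col m : Int) :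
    blocks.foldl (pvStepA col) m = m := by
  induction blocks generalizing m with
  | nil => rfl
  | cons b bs ih =>
    have hb : pvRowsOf b = [] := h b (by simp)
    have hng : ¬ (42 : Int) ≤ (b.2.1.length : Int) := by
      intro hq; rw [pvRowsOf_qual b hq] at hb; simp at hb
    rw [List.foldl_cons, show pvStepA col m b = m from by
      simp only [pvStepA]; rw [if_neg hng]]
    exact ih (fun blk hblk => h blk (by simp [hblk])) m

-- ===== VERDICT =====
theorem calculate_global_widths_spec : Claim_equal_calculate_global_widths := by
  intro blocks _
  show calculate_global_widths blocks = calculate_global_widths_alt blocks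
  have hA : calculate_global_widths blocks
      = ([0, 1, 2, 3, 4, 5, 6, 7, 8, 9, 10, 11] : List Int).map
          (fun col => blocks.foldl (pvStepA col) 0 + 4) := by
    rw [show calculate_global_widths blocks
        = (PySem.List.pyRange 0 12 1).foldl
            (fun g col => g ++ [blocks.foldl (pvStepA col) 0 + 4]) [] from rfl,
      PySem.List.foldl_append_singleton_eq_map,
      show PySem.List.pyRange 0 12 1 = [0,1,2,3,4,5,6,7,8,9,10,11] from rfl]
    simp
  have hcast : ([0, 1, 2, 3, 4, 5, 6, 7, 8, 9, 10, 11] : List Int)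
      = (List.range 12).map (fun j => ((j : Nat) : Int)) := by decide
  have hA' : calculate_global_widths blocks
      = (List.range 12).map (fun j => blocks.foldl (pvStepA ((j : Nat) : Int)) 0 + 4) := by
    rw [hA, hcast, List.map_map]; rfl
  have hB : calculate_global_widths_alt blocks
      = (if (blocks.flatMap pvRowsOf).isEmpty then List.replicate 12 ([] : List String)
         else pyZipStar (blocks.flatMap pvRowsOf)).map (fun column =>
            PySem.List.maxD (column.map PySem.Str.len) (fun x => x) 0 + 4) := rfl
  by_cases hrows : blocks.flatMap pvRowsOf = []
  · have hq : ∀ blk ∈ blocks, pvRowsOf blk = [] := List.flatMap_eq_nil_iff.mp hrows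
    rw [hA', hB, hrows]
    simp [pv_foldl_unqual blocks hq]
  · obtain ⟨r0, rest, hcons⟩ := List.exists_cons_of_ne_nil hrows
    have hlens : ∀ r ∈ r0 :: rest, r.length = 12 := by
      intro r hr; exact pv_row_len blocks r (hcons ▸ hr)
    rw [hA', hB, hcons, show (r0 :: rest).isEmpty = false from rfl]
    simp only [Bool.false_eq_true, if_false, pv_zipStar r0 rest hlens, List.map_map]
    apply List.map_congr_left
    intro j hj
    have hj12 : j < 12 := List.mem_range.mp hj
    have := pv_col blocks j hj12
    rw [hcons] at this
    simp only [Function.comp, this]
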